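-- pv_equiv track=rewrite | github.com/BatVanko/ex_3_2x2_squares_in_matrix_exercises_multidimensional_lists | Sum_of_a_predetermined_square_matrix.py | is_square_matrix_of_n
-- ===== SOURCE A (Python) =====
-- def is_square_matrix_of_n(matrix, row, col, n_matrix_square):
--     symbols_in_matrix = []
--     if 0 <= row < len(matrix)  and 0 <= col < len(matrix[0]):
--         for i in range(row,row + n_matrix_square):
--             for j in range(col, col + n_matrix_square):
--                 current_symbol = matrix[i][j]
--                 symbols_in_matrix.append(current_symbol)
--     is_square_matrix = True
--     for i in range(len(symbols_in_matrix)-1):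
--         if symbols_in_matrix[i+ 1]  != symbols_in_matrix[i]:
--             is_square_matrix = False
--     return is_square_matrix
-- ===== SOURCE B (Python) =====
-- def is_square_matrix_of_n(matrix, row, col, n_matrix_square):
--     if not (0 <= row < len(matrix) and 0 <= col < len(matrix[0])):
--         return True
--     return all(matrix[i][j] == matrix[row][col]
--                for i in range(row, row + n_matrix_square)
--                for j in range(col, col + n_matrix_square))
-- ===== Notes on version B (the rewrite author's own statement) =====
-- stated objective: simpler
-- what changed: Instead of materializing the flattened list of submatrix symbols and then making a second pass over adjacent pairs, B does one fused short-circuiting nested pass comparing every cell to the reference cell matrix[row][col].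
import Mathlib
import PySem

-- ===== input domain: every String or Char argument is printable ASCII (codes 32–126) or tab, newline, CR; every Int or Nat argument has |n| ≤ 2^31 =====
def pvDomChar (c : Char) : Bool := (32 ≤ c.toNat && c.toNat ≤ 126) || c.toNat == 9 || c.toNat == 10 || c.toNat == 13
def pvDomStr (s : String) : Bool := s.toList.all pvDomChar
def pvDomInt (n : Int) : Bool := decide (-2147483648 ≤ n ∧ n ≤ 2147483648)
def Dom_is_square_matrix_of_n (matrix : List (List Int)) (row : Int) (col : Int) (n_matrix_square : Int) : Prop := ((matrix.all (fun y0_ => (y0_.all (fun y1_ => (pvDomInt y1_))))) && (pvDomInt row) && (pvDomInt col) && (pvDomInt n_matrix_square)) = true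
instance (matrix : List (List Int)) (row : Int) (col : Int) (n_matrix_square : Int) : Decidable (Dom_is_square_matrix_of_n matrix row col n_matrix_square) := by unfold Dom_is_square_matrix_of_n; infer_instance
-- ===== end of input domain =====

set_option maxRecDepth 4000


-- B replaces A's materialized symbol list + second adjacent-pairs pass by one fused
-- short-circuiting nested pass comparing each cell to the reference cell matrix[row][col] (simpler).

-- ===== PORT A =====
-- phase 1 of A: build symbols_in_matrix (the guarded window collection loop)
def pvSymbols (matrix : List (List Int)) (row : Int) (col : Int) (n_matrix_square : Int) : List Int :=
  if 0 ≤ row ∧ row < (matrix.length : Int) ∧ 0 ≤ col ∧ col < ((matrix.getD 0 []).length : Int) then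
    (PySem.List.pyRange row (row + n_matrix_square) 1).foldl (fun acc i =>
      (PySem.List.pyRange col (col + n_matrix_square) 1).foldl (fun acc2 j =>
        acc2 ++ [PySem.List.pyGetD (PySem.List.pyGetD matrix i []) j 0]) acc) []
  else []

-- phase 2 of A: the is_square_matrix flag loop over adjacent pairs
def pvAdjacentFlag (s : List Int) : Bool :=
  (PySem.List.pyRange 0 ((s.length : Int) - 1) 1).foldl (fun b i =>
    if PySem.List.pyGetD s (i + 1) 0 ≠ PySem.List.pyGetD s i 0 then false else b) true

def is_square_matrix_of_n (matrix : List (List Int)) (row : Int) (col : Int) (n_matrix_square : Int) : Bool :=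
  pvAdjacentFlag (pvSymbols matrix row col n_matrix_square)

-- ===== PORT B =====
def is_square_matrix_of_n_alt (matrix : List (List Int)) (row : Int) (col : Int) (n_matrix_square : Int) : Bool :=
  if 0 ≤ row ∧ row < (matrix.length : Int) ∧ 0 ≤ col ∧ col < ((matrix.getD 0 []).length : Int) then
    (PySem.List.pyRange row (row + n_matrix_square) 1).all (fun i =>
      (PySem.List.pyRange col (col + n_matrix_square) 1).all (fun j =>
        PySem.List.pyGetD (PySem.List.pyGetD matrix i []) j 0
          == PySem.List.pyGetD (PySem.List.pyGetD matrix row []) col 0))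
  else true

-- ===== PRECONDITION & SPEC =====
-- Pre_ excludes exactly the inputs on which A raises IndexError: the bounds guard holds but
-- some visited cell (i, j) of the n×n window is outside the (possibly ragged) matrix.
def Pre_is_square_matrix_of_n (matrix : List (List Int)) (row : Int) (col : Int) (n_matrix_square : Int) : Prop :=
  (0 ≤ row ∧ row < (matrix.length : Int) ∧ 0 ≤ col ∧ col < ((matrix.getD 0 []).length : Int)) →
    ((n_matrix_square ≤ 0 ∨ row + n_matrix_square ≤ (matrix.length : Int)) ∧
     ∀ i ∈ PySem.List.pyRange row (row + n_matrix_square) 1,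
       col + n_matrix_square ≤ ((matrix.getD i.toNat []).length : Int))
instance (matrix : List (List Int)) (row : Int) (col : Int) (n_matrix_square : Int) : Decidable (Pre_is_square_matrix_of_n matrix row col n_matrix_square) := by unfold Pre_is_square_matrix_of_n; infer_instance

def pvWitness_is_square_matrix_of_n : List (List Int) × Int × Int × Int := ([[1, 1], [1, 1]], 0, 0, 2)

def Spec_is_square_matrix_of_n (matrix : List (List Int)) (row : Int) (col : Int) (n_matrix_square : Int) (out : Bool) : Prop := out = is_square_matrix_of_n_alt matrix row col n_matrix_square
instance (matrix : List (List Int)) (row : Int) (col : Int) (n_matrix_square : Int) (out : Bool) : Decidable (Spec_is_square_matrix_of_n matrix row col n_matrix_square out) := by unfold Spec_is_square_matrix_of_n; infer_instance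

-- ===== CLAIM (what is proved, stated in full; the proofs are below) =====
def Claim_equal_is_square_matrix_of_n : Prop := ∀ (matrix : List (List Int)) (row : Int) (col : Int) (n_matrix_square : Int), Dom_is_square_matrix_of_n matrix row col n_matrix_square → Pre_is_square_matrix_of_n matrix row col n_matrix_square → Spec_is_square_matrix_of_n matrix row col n_matrix_square (is_square_matrix_of_n matrix row col n_matrix_square)

-- ===== LEMMAS AND PROOFS =====

-- A's flag loop: folding "if mismatch then false else b" is the 'all' of no-mismatch.
theorem foldl_ite_false_eq_all (p : Int → Prop) [DecidablePred p] :
    ∀ (L : List Int) (b : Bool),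
      L.foldl (fun b i => if p i then false else b) b = (b && L.all (fun i => decide ¬ p i)) := by
  intro L
  induction L with
  | nil => intro b; simp
  | cons x t ih =>
      intro b
      simp only [List.foldl_cons, List.all_cons, ih]
      by_cases h : p x <;> simp [h]

-- A's symbol collection is the row-major flatten of the window.
theorem foldl_collect_eq_flatMap (C : List Int) (g : Int → Int → Int) :
    ∀ (L : List Int) (init : List Int),
      L.foldl (fun acc i => C.foldl (fun acc2 j => acc2 ++ [g i j]) acc) init
        = init ++ L.flatMap (fun i => C.map (g i)) := by
  intro L
  induction L with
  | nil => intro init; simp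
  | cons x t ih =>
      intro init
      have h1 : (C.foldl (fun acc2 j => acc2 ++ [g x j]) init) = init ++ C.map (g x) :=
        PySem.List.foldl_append_singleton_eq_map _ _ _
      rw [List.foldl_cons, h1, ih, List.flatMap_cons, List.append_assoc]

-- adjacent-pairs-all-equal over a nonempty list equals all-equal-to-head
theorem adj_all_eq_all_head (a : Int) (t : List Int) :
    ((List.range t.length).all (fun k => (a :: t).getD (k + 1) 0 == (a :: t).getD k 0))
    = (a :: t).all (fun x => x == a) := by
  induction t generalizing a with
  | nil => simp
  | cons b t' ih =>
      rw [show (b :: t').length = t'.length + 1 from rfl, List.range_succ_eq_map]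
      simp only [List.all_cons, List.all_map]
      have hcomp : ((fun k => (a :: b :: t').getD (k + 1) 0 == (a :: b :: t').getD k 0) ∘ Nat.succ)
          = (fun k => (b :: t').getD (k + 1) 0 == (b :: t').getD k 0) := by
        funext k
        simp [Function.comp]
      rw [hcomp, ih b]
      simp only [List.getD_cons_succ, List.getD_cons_zero, List.all_cons, beq_self_eq_true,
        Bool.true_and]
      by_cases hba : b = a
      · subst hba; simp
      · have hba' : (b == a) = false := by simp [hba]
        rw [hba']
        simp

-- B's nested all is the all over the flattened window
theorem all_flatMap_window (R C : List Int) (g : Int → Int → Int) (r : Int) :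
    (R.all (fun i => C.all (fun j => g i j == r)))
    = ((R.flatMap (fun i => C.map (g i))).all (fun x => x == r)) := by
  induction R with
  | nil => simp
  | cons x t ih =>
      simp only [List.all_cons, List.flatMap_cons, List.all_append, ih, List.all_map]
      rfl

-- A's phase 2 on a nonempty list checks that every element equals the head
theorem pvAdjacentFlag_cons (a : Int) (t : List Int) :
    pvAdjacentFlag (a :: t) = (a :: t).all (fun x => x == a) := by
  unfold pvAdjacentFlag
  have hlen : (((a :: t).length : Int) - 1) = ((t.length : Nat) : Int) := by
    simp only [List.length_cons]
    push_cast
    ring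
  rw [hlen, PySem.List.pyRange_zero_nat,
    foldl_ite_false_eq_all (fun i =>
      PySem.List.pyGetD (a :: t) (i + 1) 0 ≠ PySem.List.pyGetD (a :: t) i 0),
    Bool.true_and, List.all_map, ← adj_all_eq_all_head a t]
  apply congrArg
  funext k
  have h1 : ((k : Int) + 1) = (((k + 1 : Nat) : Int)) := by push_cast; ring
  simp only [Function.comp, h1, PySem.List.pyGetD_natCast, ne_eq, decide_not, Bool.not_not]
  rfl

theorem is_square_matrix_of_n_eq_alt (matrix : List (List Int)) (row col n : Int) :
    is_square_matrix_of_n matrix row col n = is_square_matrix_of_n_alt matrix row col n := by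
  unfold is_square_matrix_of_n is_square_matrix_of_n_alt pvSymbols
  by_cases hguard : 0 ≤ row ∧ row < (matrix.length : Int) ∧ 0 ≤ col ∧ col < ((matrix.getD 0 []).length : Int)
  · rw [if_pos hguard, if_pos hguard,
      foldl_collect_eq_flatMap (PySem.List.pyRange col (col + n) 1)
        (fun i j => PySem.List.pyGetD (PySem.List.pyGetD matrix i []) j 0)
        (PySem.List.pyRange row (row + n) 1) [], List.nil_append]
    set g : Int → Int → Int := fun i j => PySem.List.pyGetD (PySem.List.pyGetD matrix i []) j 0 with hg
    by_cases hn : n ≤ 0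
    · rw [PySem.List.pyRange_one_eq_nil (by omega : row + n ≤ row)]
      simp [pvAdjacentFlag, PySem.List.pyRange_one_eq_nil (by omega : (-1 : Int) ≤ 0)]
    · -- n ≥ 1 : the window is nonempty and its first element is g row col
      rw [PySem.List.pyRange_one_cons (by omega : row < row + n),
          PySem.List.pyRange_one_cons (by omega : col < col + n)]
      rw [all_flatMap_window _ _ g (g row col)]
      have hflat : (((row : Int) :: PySem.List.pyRange (row + 1) (row + n) 1).flatMap
            (fun i => ((col : Int) :: PySem.List.pyRange (col + 1) (col + n) 1).map (g i)))
          = g row col :: ((PySem.List.pyRange (col + 1) (col + n) 1).map (g row)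
              ++ (PySem.List.pyRange (row + 1) (row + n) 1).flatMap
                   (fun i => ((col : Int) :: PySem.List.pyRange (col + 1) (col + n) 1).map (g i))) := by
        simp
      rw [hflat, pvAdjacentFlag_cons]
  · rw [if_neg hguard, if_neg hguard]
    simp [pvAdjacentFlag, PySem.List.pyRange_one_eq_nil (by omega : (-1 : Int) ≤ 0)]

-- ===== VERDICT (by name: the statement is the Claim_ definition above) =====
theorem is_square_matrix_of_n_spec : Claim_equal_is_square_matrix_of_n := by
  intro matrix row col n _ _
  unfold Spec_is_square_matrix_of_n
  exact is_square_matrix_of_n_eq_alt matrix row col n
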